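-- pv_equiv track=rewrite | github.com/serena-yu17/UNSW | COMP9021/Lab_4/Task4.py | lux_magic_square
-- ===== SOURCE A (Python) =====
-- def lux_magic_square(n):
--     if (n - 2) % 4 != 0:
--         return []
--     k = (n - 2) // 4
--     sq = [None] * n
--     for i in range(n):
--         sq[i] = [0] * n
--     lux = [None] * (2 * k + 1)
--     for i in range(2 * k + 1):
--         lux[i] = [None] * (2 * k + 1)
--     for j in range(k + 1):
--         for i in range(2 * k + 1):
--             lux[i][j] = 0
--     for i in range(2 * k + 1):
--         lux[i][k + 1] = 1
--     for j in range(k + 2, 2 * k + 1):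
--         for i in range(2 * k + 1):
--             lux[i][j] = 2
--     lux[k][k + 1] = 0
--     lux[k][k] = 1
--     x = k
--     y = 0
--     for i in range(0, n ** 2, 4):
--         if lux[x][y] == 0:
--             sq[x * 2][y * 2] = i + 4
--             sq[x * 2 + 1][y * 2] = i + 1
--             sq[x * 2][y * 2 + 1] = i + 2
--             sq[x * 2 + 1][y * 2 + 1] = i + 3
--         elif lux[x][y] == 1:
--             sq[x * 2][y * 2] = i + 1
--             sq[x * 2 + 1][y * 2] = i + 4
--             sq[x * 2][y * 2 + 1] = i + 2
--             sq[x * 2 + 1][y * 2 + 1] = i + 3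
--         elif lux[x][y] == 2:
--             sq[x * 2][y * 2] = i + 1
--             sq[x * 2 + 1][y * 2] = i + 4
--             sq[x * 2][y * 2 + 1] = i + 3
--             sq[x * 2 + 1][y * 2 + 1] = i + 2
--         x += 1
--         y -= 1
--         if x == 2 * k + 1:
--             x = 0
--         if y == -1:
--             y = 2 * k
--         if sq[x * 2][y * 2] != 0:
--             x -= 1
--             y += 2
--             if x == -1:
--                 x = 2 * k
--             if y == 2 * k + 1:
--                 y = 0
--             elif y == 2 * k + 2:
--                 y = 1
--     return sq
-- ===== SOURCE B (Python) =====
-- def lux_magic_square(n):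
--     # Return value only; no lux table and no collision walk: each group's cell
--     # comes from the closed-form reflected-Siamese position, its L/U/X type
--     # from a direct column rule.
--     if (n - 2) % 4 != 0:
--         return []
--     if n < 6:
--         # no LUX magic square exists for these sizes (n = 2 and negative n)
--         raise ValueError("LUX method requires n >= 6 with n == 2 (mod 4)")
--     k = (n - 2) // 4
--     N = 2 * k + 1
--     sq = [[0] * n for _ in range(n)]
--     for m in range(N * N):
--         q = m // N
--         r = m % N
--         x = (k + r - q) % N
--         y = (2 * q - r) % N
--         if x == k and y == k:
--             t = 1
--         elif x == k and y == k + 1: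
--             t = 0
--         elif y <= k:
--             t = 0
--         elif y == k + 1:
--             t = 1
--         else:
--             t = 2
--         i = 4 * m
--         if t == 0:
--             sq[x * 2][y * 2] = i + 4
--             sq[x * 2 + 1][y * 2] = i + 1
--             sq[x * 2][y * 2 + 1] = i + 2
--             sq[x * 2 + 1][y * 2 + 1] = i + 3
--         elif t == 1:
--             sq[x * 2][y * 2] = i + 1
--             sq[x * 2 + 1][y * 2] = i + 4
--             sq[x * 2][y * 2 + 1] = i + 2
--             sq[x * 2 + 1][y * 2 + 1] = i + 3
--         else:
--             sq[x * 2][y * 2] = i + 1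
--             sq[x * 2 + 1][y * 2] = i + 4
--             sq[x * 2][y * 2 + 1] = i + 3
--             sq[x * 2 + 1][y * 2 + 1] = i + 2
--     return sq
-- ===== Notes on version B (the rewrite author's own statement) =====
-- stated objective: alternative
-- what changed: B drops A's prebuilt lux table and its collision-driven Siamese walk: for each group index m it computes the block's (row,col) directly by the closed-form reflected-de-la-Loubere position formula ((k+r-q) mod N, (2q-r) mod N) for q,r = divmod(m,N), and picks the L/U/X block layout by a direct column rule with the two swapped cells as special cases, placing the four values in one pass.
import Mathlib
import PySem

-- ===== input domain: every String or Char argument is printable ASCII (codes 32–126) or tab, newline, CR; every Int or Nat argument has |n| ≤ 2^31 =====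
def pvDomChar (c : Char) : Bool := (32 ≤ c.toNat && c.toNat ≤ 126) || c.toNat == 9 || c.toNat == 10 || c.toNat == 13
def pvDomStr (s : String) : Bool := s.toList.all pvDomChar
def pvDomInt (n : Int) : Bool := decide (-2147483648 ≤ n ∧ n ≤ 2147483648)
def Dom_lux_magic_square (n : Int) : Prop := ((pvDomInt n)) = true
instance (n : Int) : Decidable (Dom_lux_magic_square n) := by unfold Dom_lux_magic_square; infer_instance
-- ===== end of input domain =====

-- B replaces A's lux table and collision-driven Siamese walk by a closed-form position
-- formula and a direct column rule (return value only; equivalence proved on Pre_).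

-- ===== PORT A =====

-- sq[x][y]  (exact: all reads in both ports use indices 0 ≤ i < len)
def pvGet2 (g : List (List Int)) (x y : Int) : Int :=
  PySem.List.pyGetD (PySem.List.pyGetD g x []) y 0

-- sq[x][y] = v  (exact: all writes in both ports use indices 0 ≤ i < len)
def pvSet2 (g : List (List Int)) (x y v : Int) : List (List Int) :=
  PySem.List.pySetD g x (PySem.List.pySetD (PySem.List.pyGetD g x []) y v)

-- the lux table of A; 'None' placeholders ported as [] / -1: every entry is overwritten before any read
def pvLuxTable (k : Int) : List (List Int) :=
  let lux := (PySem.List.pyRange 0 (2*k+1) 1).foldl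
      (fun L i => PySem.List.pySetD L i (List.replicate (2*k+1).toNat (-1)))
      (List.replicate (2*k+1).toNat ([] : List Int))
  let lux := (PySem.List.pyRange 0 (k+1) 1).foldl
      (fun L j => (PySem.List.pyRange 0 (2*k+1) 1).foldl (fun L i => pvSet2 L i j 0) L) lux
  let lux := (PySem.List.pyRange 0 (2*k+1) 1).foldl (fun L i => pvSet2 L i (k+1) 1) lux
  let lux := (PySem.List.pyRange (k+2) (2*k+1) 1).foldl
      (fun L j => (PySem.List.pyRange 0 (2*k+1) 1).foldl (fun L i => pvSet2 L i j 2) L) lux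
  let lux := pvSet2 lux k (k+1) 0
  pvSet2 lux k k 1

-- one iteration of A's Siamese walk loop
def pvStepA (k : Int) (lux : List (List Int)) (st : List (List Int) × Int × Int) (i : Int) :
    List (List Int) × Int × Int :=
  let sq := st.1
  let x := st.2.1
  let y := st.2.2
  let c := pvGet2 lux x y
  let sq :=
    if c = 0 then
      pvSet2 (pvSet2 (pvSet2 (pvSet2 sq (x*2) (y*2) (i+4)) (x*2+1) (y*2) (i+1)) (x*2) (y*2+1) (i+2)) (x*2+1) (y*2+1) (i+3)
    else if c = 1 then
      pvSet2 (pvSet2 (pvSet2 (pvSet2 sq (x*2) (y*2) (i+1)) (x*2+1) (y*2) (i+4)) (x*2) (y*2+1) (i+2)) (x*2+1) (y*2+1) (i+3)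
    else if c = 2 then
      pvSet2 (pvSet2 (pvSet2 (pvSet2 sq (x*2) (y*2) (i+1)) (x*2+1) (y*2) (i+4)) (x*2) (y*2+1) (i+3)) (x*2+1) (y*2+1) (i+2)
    else sq
  let x := x + 1
  let y := y - 1
  let x := if x = 2*k+1 then 0 else x
  let y := if y = -1 then 2*k else y
  if pvGet2 sq (x*2) (y*2) ≠ 0 then
    let x := x - 1
    let y := y + 2
    let x := if x = -1 then 2*k else x
    let y := if y = 2*k+1 then 0 else if y = 2*k+2 then 1 else y
    (sq, x, y)
  else
    (sq, x, y)

def lux_magic_square (n : Int) : List (List Int) :=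
  if PySem.Int.mod (n - 2) 4 ≠ 0 then []
  else
    let k := PySem.Int.floordiv (n - 2) 4
    let sq := (PySem.List.pyRange 0 n 1).foldl
        (fun s i => PySem.List.pySetD s i (List.replicate n.toNat 0))
        (List.replicate n.toNat ([] : List Int))
    let lux := pvLuxTable k
    ((PySem.List.pyRange 0 (n^2) 4).foldl (fun st i => pvStepA k lux st i) (sq, (k, 0))).1

-- ===== PORT B =====
-- one block placement of B: closed-form position, column-rule type
def pvStepB (k N : Int) (sq : List (List Int)) (m : Int) : List (List Int) :=
  let q := PySem.Int.floordiv m N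
  let r := PySem.Int.mod m N
  let x := PySem.Int.mod (k + r - q) N
  let y := PySem.Int.mod (2*q - r) N
  let t : Int :=
    if x = k ∧ y = k then 1
    else if x = k ∧ y = k + 1 then 0
    else if y ≤ k then 0
    else if y = k + 1 then 1
    else 2
  let i := 4*m
  if t = 0 then
    pvSet2 (pvSet2 (pvSet2 (pvSet2 sq (x*2) (y*2) (i+4)) (x*2+1) (y*2) (i+1)) (x*2) (y*2+1) (i+2)) (x*2+1) (y*2+1) (i+3)
  else if t = 1 then
    pvSet2 (pvSet2 (pvSet2 (pvSet2 sq (x*2) (y*2) (i+1)) (x*2+1) (y*2) (i+4)) (x*2) (y*2+1) (i+2)) (x*2+1) (y*2+1) (i+3)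
  else
    pvSet2 (pvSet2 (pvSet2 (pvSet2 sq (x*2) (y*2) (i+1)) (x*2+1) (y*2) (i+4)) (x*2) (y*2+1) (i+3)) (x*2+1) (y*2+1) (i+2)

def lux_magic_square_alt (n : Int) : List (List Int) :=
  if PySem.Int.mod (n - 2) 4 ≠ 0 then []
  else if n < 6 then []   -- Source B raises ValueError here (outside Pre_); [] is the totalizing placeholder
  else
    let k := PySem.Int.floordiv (n - 2) 4
    let N := 2*k + 1
    (PySem.List.pyRange 0 (N*N) 1).foldl (fun sq m => pvStepB k N sq m)
      (List.replicate n.toNat (List.replicate n.toNat 0))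


-- ===== PRECONDITION & SPEC =====
-- Pre_ excludes exactly the inputs where both Pythons raise (A: IndexError, B: ValueError):
-- n = 2 (the 1×1 lux table has no column k+1) and negative n ≡ 2 (mod 4) (empty lux table).
def Pre_lux_magic_square (n : Int) : Prop := n % 4 = 2 → 6 ≤ n
instance (n : Int) : Decidable (Pre_lux_magic_square n) := by unfold Pre_lux_magic_square; infer_instance

def pvWitness_lux_magic_square : Int := (6)

def Spec_lux_magic_square (n : Int) (out : List (List Int)) : Prop := out = lux_magic_square_alt n
instance (n : Int) (out : List (List Int)) : Decidable (Spec_lux_magic_square n out) := by unfold Spec_lux_magic_square; infer_instance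

-- ===== CLAIM (what is proved, stated in full; the proofs are below) =====
def Claim_equal_lux_magic_square : Prop := ∀ (n : Int), Dom_lux_magic_square n → Pre_lux_magic_square n → Spec_lux_magic_square n (lux_magic_square n)

-- ===== LEMMAS AND PROOFS =====

-- dimensions of a grid: n' rows, each of length n'
def pvDims (g : List (List Int)) (n' : Nat) : Prop :=
  g.length = n' ∧ ∀ row ∈ g, row.length = n'

def pvInit (n' : Nat) : List (List Int) := List.replicate n' (List.replicate n' 0)

-- one conditional fold of a value into [0, N)
def pvWrap (N a : Int) : Int := if a < 0 then a + N else if N ≤ a then a - N else a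

-- closed-form position of group (q, r): the reflected-Siamese walk position
def pvPX (K : Nat) (q r : Nat) : Int := pvWrap (2*(K:Int)+1) ((K:Int) + r - q)
def pvPY (K : Nat) (q r : Nat) : Int := pvWrap (2*(K:Int)+1) (pvWrap (2*(K:Int)+1) (2*(q:Int) - r))
def pvX (K t : Nat) : Int := pvPX K (t / (2*K+1)) (t % (2*K+1))
def pvY (K t : Nat) : Int := pvPY K (t / (2*K+1)) (t % (2*K+1))

-- the L/U/X rule
def pvRule (k x y : Int) : Int :=
  if x = k ∧ y = k then 1
  else if x = k ∧ y = k + 1 then 0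
  else if y ≤ k then 0
  else if y = k + 1 then 1
  else 2

def pvGridB (K : Nat) (T : Nat) : List (List Int) :=
  (List.range T).foldl (fun sq (m : Nat) => pvStepB (K:Int) (2*(K:Int)+1) sq (m:Int)) (pvInit (4*K+2))

def pvLoopA (K : Nat) (T : Nat) : List (List Int) × Int × Int :=
  (List.range T).foldl (fun st (m : Nat) => pvStepA (K:Int) (pvLuxTable (K:Int)) st (4*(m:Int)))
    (pvInit (4*K+2), ((K:Int), 0))

-- ---- basic grid lemmas ----
theorem pvGet2_init (n' : Nat) (x y : Int) (hx : 0 ≤ x) (hx2 : x < n') (hy : 0 ≤ y) (hy2 : y < n') :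
    pvGet2 (pvInit n') x y = 0 := by
  unfold pvGet2 pvInit
  rw [PySem.List.pyGetD_eq_getElem _ _ hx (by simpa using hx2)]
  rw [List.getElem_replicate]
  rw [PySem.List.pyGetD_eq_getElem _ _ hy (by simpa using hy2)]
  rw [List.getElem_replicate]

theorem pvDims_init (n' : Nat) : pvDims (pvInit n') n' := by
  constructor
  · simp [pvInit]
  · intro row hrow
    simp [pvInit] at hrow
    simp [hrow.2]

theorem pvDims_set2 {g : List (List Int)} {n' : Nat} (hd : pvDims g n') (x y v : Int)
    (hx : 0 ≤ x) (hx2 : x < n') : pvDims (pvSet2 g x y v) n' := by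
  obtain ⟨hlen, hrows⟩ := hd
  unfold pvSet2
  rw [PySem.List.pySetD_of_nonneg _ _ hx]
  refine ⟨by simpa using hlen, ?_⟩
  intro row hrow
  rcases List.mem_or_eq_of_mem_set hrow with h | h
  · exact hrows _ h
  · subst h
    rw [PySem.List.pyGetD_eq_getElem _ _ hx (by omega)]
    rw [PySem.List.length_pySetD]
    exact hrows _ (List.getElem_mem _)

theorem pvGet2_eq {g : List (List Int)} {x y : Int} (hx : 0 ≤ x) (hy : 0 ≤ y)
    (h1 : x.toNat < g.length) (h2 : y.toNat < (g[x.toNat]).length) :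
    pvGet2 g x y = g[x.toNat][y.toNat] := by
  unfold pvGet2
  rw [PySem.List.pyGetD_eq_getElem g _ hx (by omega),
      PySem.List.pyGetD_eq_getElem _ _ hy (by omega)]

theorem pvSet2_eq {g : List (List Int)} {x y : Int} (v : Int) (hx : 0 ≤ x) (hy : 0 ≤ y)
    (h1 : x.toNat < g.length) :
    pvSet2 g x y v = g.set x.toNat ((g[x.toNat]).set y.toNat v) := by
  unfold pvSet2
  rw [PySem.List.pyGetD_eq_getElem g _ hx (by omega),
      PySem.List.pySetD_of_nonneg _ _ hy,
      PySem.List.pySetD_of_nonneg _ _ hx]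

theorem pvGet2_set2 {g : List (List Int)} {n' : Nat} (hd : pvDims g n') {x y x' y' : Int} (v : Int)
    (hx : 0 ≤ x) (hx2 : x < n') (hy : 0 ≤ y) (hy2 : y < n')
    (hx' : 0 ≤ x') (hx2' : x' < n') (hy' : 0 ≤ y') (hy2' : y' < n') :
    pvGet2 (pvSet2 g x y v) x' y' = if x' = x ∧ y' = y then v else pvGet2 g x' y' := by
  obtain ⟨hlen, hrows⟩ := hd
  have hxg : x.toNat < g.length := by omega
  have hxg' : x'.toNat < g.length := by omega
  have hrowlen : (g[x.toNat]).length = n' := hrows _ (List.getElem_mem _)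
  have hrowlen' : (g[x'.toNat]).length = n' := hrows _ (List.getElem_mem _)
  have hd2 : pvDims (pvSet2 g x y v) n' := pvDims_set2 ⟨hlen, hrows⟩ x y v hx hx2
  have hlen2 : (pvSet2 g x y v).length = n' := hd2.1
  have hrl2 : ((pvSet2 g x y v)[x'.toNat]'(by omega)).length = n' :=
    hd2.2 _ (List.getElem_mem _)
  rw [pvGet2_eq hx' hy' (by omega) (by omega)]
  rw [pvGet2_eq hx' hy' hxg' (by omega)]
  simp only [pvSet2_eq v hx hy hxg]
  by_cases hxx : x' = x
  · have ext : x.toNat = x'.toNat := by omega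
    by_cases hyy : y' = y
    · have eyt : y.toNat = y'.toNat := by omega
      simp [ext, eyt, hxx, hyy]
    · have eyt : ¬ (y.toNat = y'.toNat) := by omega
      simp [ext, eyt, hxx, hyy]
  · have ext : ¬ (x.toNat = x'.toNat) := by omega
    simp [ext, hxx]

-- ---- initial sq of A ----
theorem pvFoldSet {α : Type} (v : α) : ∀ (t : Nat) (l : List α), t ≤ l.length →
    (List.range t).foldl (fun s i => s.set i v) l = List.replicate t v ++ l.drop t := by
  intro t
  induction t with
  | zero => simp
  | succ t ih =>
    intro l ht
    rw [List.range_succ, List.foldl_append]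
    simp only [List.foldl_cons, List.foldl_nil]
    rw [ih l (by omega)]
    rw [List.set_append_right _ _ (by simp)]
    simp only [List.length_replicate, Nat.sub_self]
    have hset : (List.drop t l).set 0 v = v :: List.drop (t+1) l := by
      rw [List.drop_eq_getElem_cons (show t < l.length by omega)]
      rfl
    rw [hset]
    simp [List.replicate_succ']

theorem pvInitA (n : Int) (hn : 0 ≤ n) :
    (PySem.List.pyRange 0 n 1).foldl
        (fun s i => PySem.List.pySetD s i (List.replicate n.toNat 0))
        (List.replicate n.toNat ([] : List Int)) = pvInit n.toNat := by
  rw [PySem.List.pyRange_one]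
  rw [List.foldl_map]
  simp only [zero_add, sub_zero, PySem.List.pySetD_natCast]
  rw [pvFoldSet _ _ _ (by simp)]
  simp [pvInit]

-- ---- arithmetic ----
theorem pvEmod_wrap (N a : Int) (hN : 0 < N) (h1 : -N ≤ a) (h2 : a < 2*N) : a % N = pvWrap N a := by
  unfold pvWrap
  split_ifs with h h'
  · calc a % N = (a + N * 1) % N := (Int.add_mul_emod_self_left a N 1).symm
    _ = a + N := by rw [mul_one]; exact Int.emod_eq_of_lt (by omega) (by omega)
  · calc a % N = (a - N + N * 1) % N := by ring_nf
    _ = (a - N) % N := Int.add_mul_emod_self_left (a - N) N 1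
    _ = a - N := Int.emod_eq_of_lt (by omega) (by omega)
  · exact Int.emod_eq_of_lt (by omega) (by omega)

theorem pvEmod_wrap2 (N a : Int) (hN : 0 < N) (h1 : -N ≤ a) (h2 : a ≤ 2*N) :
    a % N = pvWrap N (pvWrap N a) := by
  by_cases h : a < 2*N
  · rw [pvEmod_wrap N a hN h1 h]
    have h0 : 0 ≤ pvWrap N a ∧ pvWrap N a < N := by unfold pvWrap; split_ifs <;> omega
    unfold pvWrap
    split_ifs <;> omega
  · have ha : a = 2*N := by omega
    subst ha
    have : (2*N) % N = 0 := by
      have := Int.mul_emod_right N 2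
      simpa [mul_comm] using this
    rw [this]
    unfold pvWrap
    split_ifs <;> omega

theorem pvPX_range (K q r : Nat) (hq : q ≤ 2*K+1) (hr : r < 2*K+1) :
    0 ≤ pvPX K q r ∧ pvPX K q r < 2*(K:Int)+1 := by
  unfold pvPX pvWrap
  split_ifs <;> omega

theorem pvPY_range (K q r : Nat) (hq : q ≤ 2*K+1) (hr : r < 2*K+1) :
    0 ≤ pvPY K q r ∧ pvPY K q r < 2*(K:Int)+1 := by
  unfold pvPY pvWrap
  split_ifs <;> omega

set_option maxHeartbeats 1600000 in
theorem pvPair_inj (K : Nat) (hK : 1 ≤ K) {q1 r1 q2 r2 : Nat}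
    (hq1 : q1 < 2*K+1) (hr1 : r1 < 2*K+1) (hq2 : q2 < 2*K+1) (hr2 : r2 < 2*K+1)
    (hx : pvPX K q1 r1 = pvPX K q2 r2) (hy : pvPY K q1 r1 = pvPY K q2 r2) :
    q1 = q2 ∧ r1 = r2 := by
  simp only [pvPX, pvPY, pvWrap] at hx hy
  split_ifs at hx hy <;> omega

-- B's computed coordinates at m = q*(2K+1)+r are the closed-form pair
theorem pvCoords (K q r : Nat) (hq : q < 2*K+1) (hr : r < 2*K+1) :
    PySem.Int.floordiv ((q*(2*K+1)+r : Nat) : Int) (2*(K:Int)+1) = (q : Int) ∧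
    PySem.Int.mod ((q*(2*K+1)+r : Nat) : Int) (2*(K:Int)+1) = (r : Int) ∧
    PySem.Int.mod ((K:Int) + (r:Int) - (q:Int)) (2*(K:Int)+1) = pvPX K q r ∧
    PySem.Int.mod (2*(q:Int) - (r:Int)) (2*(K:Int)+1) = pvPY K q r := by
  have hNN : (2*(K:Int)+1) = ((2*K+1 : Nat) : Int) := by push_cast; ring
  have hdiv : (q*(2*K+1)+r) / (2*K+1) = q := by
    rw [Nat.mul_comm q, Nat.mul_add_div (by omega), Nat.div_eq_of_lt hr]
    omega
  have hmod : (q*(2*K+1)+r) % (2*K+1) = r := by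
    rw [Nat.mul_comm q, Nat.mul_add_mod, Nat.mod_eq_of_lt hr]
  refine ⟨?_, ?_, ?_, ?_⟩
  · rw [hNN, PySem.Int.floordiv_natCast, hdiv]
  · rw [hNN, PySem.Int.mod_natCast, hmod]
  · rw [PySem.Int.mod_eq_emod_of_pos (by omega)]
    exact pvEmod_wrap _ _ (by omega) (by omega) (by omega)
  · rw [PySem.Int.mod_eq_emod_of_pos (by omega)]
    exact pvEmod_wrap2 _ _ (by omega) (by omega) (by omega)

-- ---- stepB characterization ----
theorem pvGridB_succ (K T : Nat) :
    pvGridB K (T+1) = pvStepB (K:Int) (2*(K:Int)+1) (pvGridB K T) (T : Int) := by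
  unfold pvGridB
  rw [List.range_succ, List.foldl_append]
  simp only [List.foldl_cons, List.foldl_nil]

theorem pvLoopA_succ (K T : Nat) :
    pvLoopA K (T+1) = pvStepA (K:Int) (pvLuxTable (K:Int)) (pvLoopA K T) (4*(T:Int)) := by
  unfold pvLoopA
  rw [List.range_succ, List.foldl_append]
  simp only [List.foldl_cons, List.foldl_nil]

theorem pvDims_place {g : List (List Int)} {n' : Nat} (hd : pvDims g n') (x y : Int)
    (v1 v2 v3 v4 : Int) (hx : 0 ≤ x) (hx2 : x*2+1 < n') (hy : 0 ≤ y) :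
    pvDims (pvSet2 (pvSet2 (pvSet2 (pvSet2 g (x*2) (y*2) v1) (x*2+1) (y*2) v2)
      (x*2) (y*2+1) v3) (x*2+1) (y*2+1) v4) n' := by
  exact pvDims_set2 (pvDims_set2 (pvDims_set2 (pvDims_set2 hd _ _ _ (by omega) (by omega))
    _ _ _ (by omega) (by omega)) _ _ _ (by omega) (by omega)) _ _ _ (by omega) (by omega)

theorem pvGet2_place {g : List (List Int)} {n' : Nat} (hd : pvDims g n') {x y a b : Int}
    (v1 v2 v3 v4 : Int)
    (hx : 0 ≤ x) (hx2 : x*2+1 < n') (hy : 0 ≤ y) (hy2 : y*2+1 < n')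
    (ha : 0 ≤ a) (ha2 : a*2+1 < n') (hb : 0 ≤ b) (hb2 : b*2+1 < n') :
    pvGet2 (pvSet2 (pvSet2 (pvSet2 (pvSet2 g (x*2) (y*2) v1) (x*2+1) (y*2) v2)
        (x*2) (y*2+1) v3) (x*2+1) (y*2+1) v4) (a*2) (b*2) =
      if a = x ∧ b = y then v1 else pvGet2 g (a*2) (b*2) := by
  have d1 : pvDims (pvSet2 g (x*2) (y*2) v1) n' := pvDims_set2 hd _ _ _ (by omega) (by omega)
  have d2 : pvDims (pvSet2 (pvSet2 g (x*2) (y*2) v1) (x*2+1) (y*2) v2) n' :=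
    pvDims_set2 d1 _ _ _ (by omega) (by omega)
  have d3 : pvDims (pvSet2 (pvSet2 (pvSet2 g (x*2) (y*2) v1) (x*2+1) (y*2) v2) (x*2) (y*2+1) v3) n' :=
    pvDims_set2 d2 _ _ _ (by omega) (by omega)
  rw [pvGet2_set2 d3 _ (by omega) (by omega) (by omega) (by omega) (by omega) (by omega) (by omega) (by omega)]
  rw [if_neg (by omega)]
  rw [pvGet2_set2 d2 _ (by omega) (by omega) (by omega) (by omega) (by omega) (by omega) (by omega) (by omega)]
  rw [if_neg (by omega)]
  rw [pvGet2_set2 d1 _ (by omega) (by omega) (by omega) (by omega) (by omega) (by omega) (by omega) (by omega)]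
  rw [if_neg (by omega)]
  rw [pvGet2_set2 hd _ (by omega) (by omega) (by omega) (by omega) (by omega) (by omega) (by omega) (by omega)]
  have hiff : (a*2 = x*2 ∧ b*2 = y*2) ↔ (a = x ∧ b = y) := by omega
  by_cases h : a = x ∧ b = y
  · rw [if_pos (hiff.mpr h), if_pos h]
  · rw [if_neg (fun hc => h (hiff.mp hc)), if_neg h]

theorem pvStepB_dims {g : List (List Int)} {K : Nat} (hd : pvDims g (4*K+2)) (m : Int) (hm : 0 ≤ m) :
    pvDims (pvStepB (K:Int) (2*(K:Int)+1) g m) (4*K+2) := by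
  have hN : (0:Int) < 2*(K:Int)+1 := by omega
  simp only [pvStepB]
  generalize PySem.Int.floordiv m (2*(K:Int)+1) = Q
  generalize PySem.Int.mod m (2*(K:Int)+1) = R
  generalize hX : PySem.Int.mod ((K:Int) + R - Q) (2*(K:Int)+1) = X
  generalize hY : PySem.Int.mod (2*Q - R) (2*(K:Int)+1) = Y
  have hX0 : 0 ≤ X := hX ▸ PySem.Int.mod_nonneg _ hN
  have hX1 : X < 2*(K:Int)+1 := hX ▸ PySem.Int.mod_lt _ hN
  have hY0 : 0 ≤ Y := hY ▸ PySem.Int.mod_nonneg _ hN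
  split_ifs <;> exact pvDims_place hd _ _ _ _ _ _ hX0 (by omega) hY0

set_option maxHeartbeats 1600000 in
theorem pvStepB_get2 {g : List (List Int)} {K : Nat} (hd : pvDims g (4*K+2))
    (q r : Nat) (hq : q < 2*K+1) (hr : r < 2*K+1)
    {a b : Int} (ha : 0 ≤ a) (ha2 : a < 2*(K:Int)+1) (hb : 0 ≤ b) (hb2 : b < 2*(K:Int)+1) :
    ∃ v : Int, 0 < v ∧
      pvGet2 (pvStepB (K:Int) (2*(K:Int)+1) g ((q*(2*K+1)+r : Nat) : Int)) (a*2) (b*2) =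
        if a = pvPX K q r ∧ b = pvPY K q r then v else pvGet2 g (a*2) (b*2) := by
  obtain ⟨hc1, hc2, hc3, hc4⟩ := pvCoords K q r hq hr
  have hX := pvPX_range K q r (by omega) hr
  have hY := pvPY_range K q r (by omega) hr
  have hmpos : (0:Int) ≤ ((q*(2*K+1)+r : Nat) : Int) := by positivity
  simp only [pvStepB]
  rw [hc1, hc2, hc3, hc4]
  generalize hM : ((q*(2*K+1)+r : Nat) : Int) = M at hmpos ⊢
  have B1 : 0 ≤ pvPX K q r := hX.1
  have B2 : pvPX K q r * 2 + 1 < ((4*K+2 : Nat):Int) := by push_cast; omega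
  have B3 : 0 ≤ pvPY K q r := hY.1
  have B4 : pvPY K q r * 2 + 1 < ((4*K+2 : Nat):Int) := by push_cast; omega
  have A2 : a * 2 + 1 < ((4*K+2 : Nat):Int) := by push_cast; omega
  have A4 : b * 2 + 1 < ((4*K+2 : Nat):Int) := by push_cast; omega
  have hplace : ∀ v1 v2 v3 v4 : Int,
      pvGet2 (pvSet2 (pvSet2 (pvSet2 (pvSet2 g (pvPX K q r*2) (pvPY K q r*2) v1)
          (pvPX K q r*2+1) (pvPY K q r*2) v2) (pvPX K q r*2) (pvPY K q r*2+1) v3)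
          (pvPX K q r*2+1) (pvPY K q r*2+1) v4) (a*2) (b*2) =
        if a = pvPX K q r ∧ b = pvPY K q r then v1 else pvGet2 g (a*2) (b*2) :=
    fun v1 v2 v3 v4 => pvGet2_place hd v1 v2 v3 v4 B1 B2 B3 B4 ha A2 hb A4
  set tv : Int := (if pvPX K q r = (K:Int) ∧ pvPY K q r = (K:Int) then 1
    else if pvPX K q r = (K:Int) ∧ pvPY K q r = (K:Int) + 1 then 0
    else if pvPY K q r ≤ (K:Int) then 0
    else if pvPY K q r = (K:Int) + 1 then 1 else 2) with htv
  refine ⟨if tv = 0 then 4*M+4 else 4*M+1, by split_ifs <;> omega, ?_⟩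
  rw [apply_ite (fun g' => pvGet2 g' (a*2) (b*2)), apply_ite (fun g' => pvGet2 g' (a*2) (b*2))]
  rw [hplace, hplace, hplace]
  by_cases hcond : a = pvPX K q r ∧ b = pvPY K q r
  · simp only [if_pos hcond]
    split_ifs <;> omega
  · simp only [if_neg hcond]
    split_ifs <;> rfl

theorem pvGridB_dims (K T : Nat) : pvDims (pvGridB K T) (4*K+2) := by
  induction T with
  | zero => exact pvDims_init _
  | succ T ih =>
    rw [pvGridB_succ]
    exact pvStepB_dims ih _ (by positivity)


theorem pvDivMod (K q r : Nat) (hr : r < 2*K+1) :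
    (q*(2*K+1)+r)/(2*K+1) = q ∧ (q*(2*K+1)+r)%(2*K+1) = r := by
  constructor
  · rw [Nat.mul_comm q, Nat.mul_add_div (by omega), Nat.div_eq_of_lt hr]
    omega
  · rw [Nat.mul_comm q, Nat.mul_add_mod, Nat.mod_eq_of_lt hr]

theorem pvX_eq (K q r : Nat) (hr : r < 2*K+1) : pvX K (q*(2*K+1)+r) = pvPX K q r := by
  unfold pvX
  rw [(pvDivMod K q r hr).1, (pvDivMod K q r hr).2]

theorem pvY_eq (K q r : Nat) (hr : r < 2*K+1) : pvY K (q*(2*K+1)+r) = pvPY K q r := by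
  unfold pvY
  rw [(pvDivMod K q r hr).1, (pvDivMod K q r hr).2]

theorem pvGridB_filled (K : Nat) (T : Nat) (hT : T ≤ (2*K+1)*(2*K+1))
    {a b : Int} (ha : 0 ≤ a) (ha2 : a < 2*(K:Int)+1) (hb : 0 ≤ b) (hb2 : b < 2*(K:Int)+1) :
    (pvGet2 (pvGridB K T) (a*2) (b*2) ≠ 0 ↔ ∃ t, t < T ∧ pvX K t = a ∧ pvY K t = b) := by
  revert hT
  induction T with
  | zero =>
    intro hT
    have h0 : pvGridB K 0 = pvInit (4*K+2) := rfl
    rw [h0, pvGet2_init (4*K+2) _ _ (by omega) (by push_cast; omega) (by omega) (by push_cast; omega)]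
    simp
  | succ T ih =>
    intro hT
    obtain ⟨q, r, hr, hdec⟩ : ∃ q r, r < 2*K+1 ∧ T = q*(2*K+1)+r :=
      ⟨T/(2*K+1), T%(2*K+1), Nat.mod_lt _ (by omega),
        by rw [Nat.mul_comm]; exact (Nat.div_add_mod _ _).symm⟩
    have hq : q < 2*K+1 := by
      by_contra hge
      rw [Nat.not_lt] at hge
      have h1 : (2*K+1)*(2*K+1) ≤ q*(2*K+1) := mul_le_mul_right' hge _
      omega
    rw [pvGridB_succ]
    subst hdec
    obtain ⟨v, hv, hgv⟩ := pvStepB_get2 (pvGridB_dims K _) q r hq hr ha ha2 hb hb2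
    rw [hgv]
    by_cases hcond : a = pvPX K q r ∧ b = pvPY K q r
    · rw [if_pos hcond]
      constructor
      · intro _
        exact ⟨q*(2*K+1)+r, by omega, by rw [pvX_eq K q r hr]; exact hcond.1.symm,
          by rw [pvY_eq K q r hr]; exact hcond.2.symm⟩
      · intro _
        omega
    · rw [if_neg hcond]
      rw [ih (by omega)]
      constructor
      · rintro ⟨t, ht, hxx, hyy⟩
        exact ⟨t, by omega, hxx, hyy⟩
      · rintro ⟨t, ht, hxx, hyy⟩
        rcases Nat.lt_succ_iff_lt_or_eq.mp ht with h | h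
        · exact ⟨t, h, hxx, hyy⟩
        · exfalso
          subst h
          rw [pvX_eq K q r hr] at hxx
          rw [pvY_eq K q r hr] at hyy
          exact hcond ⟨hxx.symm, hyy.symm⟩


theorem pvGet2_replicate (n' : Nat) (v : Int) (x y : Int) (hx : 0 ≤ x) (hx2 : x < n')
    (hy : 0 ≤ y) (hy2 : y < n') :
    pvGet2 (List.replicate n' (List.replicate n' v)) x y = v := by
  unfold pvGet2
  rw [PySem.List.pyGetD_eq_getElem _ _ hx (by simpa using hx2)]
  rw [List.getElem_replicate]
  rw [PySem.List.pyGetD_eq_getElem _ _ hy (by simpa using hy2)]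
  rw [List.getElem_replicate]

theorem pvRowInit (N : Int) (row : List Int) :
    (PySem.List.pyRange 0 N 1).foldl (fun L i => PySem.List.pySetD L i row)
      (List.replicate N.toNat ([] : List Int)) = List.replicate N.toNat row := by
  rw [PySem.List.pyRange_one, List.foldl_map]
  simp only [zero_add, sub_zero, PySem.List.pySetD_natCast]
  rw [pvFoldSet _ _ _ (by simp)]
  simp

theorem pvColFillAux {g : List (List Int)} {N' : Nat} (hd : pvDims g N') (j c : Int)
    (hj : 0 ≤ j) (hj2 : j < N') : ∀ t : Nat, t ≤ N' →
    pvDims ((List.range t).foldl (fun L (i : Nat) => pvSet2 L (i:Int) j c) g) N' ∧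
    (∀ x y : Int, 0 ≤ x → x < N' → 0 ≤ y → y < N' →
      pvGet2 ((List.range t).foldl (fun L (i : Nat) => pvSet2 L (i:Int) j c) g) x y
        = if y = j ∧ x < (t:Int) then c else pvGet2 g x y) := by
  intro t
  induction t with
  | zero =>
    intro _
    refine ⟨hd, ?_⟩
    intro x y hx hx2 hy hy2
    simp only [List.range_zero, List.foldl_nil]
    rw [if_neg (by omega)]
  | succ t ih =>
    intro ht
    obtain ⟨ihd, ihg⟩ := ih (by omega)
    rw [List.range_succ, List.foldl_append]
    simp only [List.foldl_cons, List.foldl_nil]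
    refine ⟨pvDims_set2 ihd _ _ _ (by omega) (by omega), ?_⟩
    intro x y hx hx2 hy hy2
    rw [pvGet2_set2 ihd c (by omega) (by omega) hj hj2 hx hx2 hy hy2]
    rw [ihg x y hx hx2 hy hy2]
    split_ifs <;> first | rfl | omega

theorem pvColFill {g : List (List Int)} {N' : Nat} (hd : pvDims g N') (j c : Int)
    (hj : 0 ≤ j) (hj2 : j < N') :
    pvDims ((PySem.List.pyRange 0 (N' : Int) 1).foldl (fun L i => pvSet2 L i j c) g) N' ∧
    (∀ x y : Int, 0 ≤ x → x < N' → 0 ≤ y → y < N' →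
      pvGet2 ((PySem.List.pyRange 0 (N' : Int) 1).foldl (fun L i => pvSet2 L i j c) g) x y
        = if y = j then c else pvGet2 g x y) := by
  rw [PySem.List.pyRange_one]
  rw [List.foldl_map]
  simp only [zero_add, sub_zero, Int.toNat_natCast]
  obtain ⟨hdd, hgg⟩ := pvColFillAux hd j c hj hj2 N' (le_refl _)
  refine ⟨hdd, ?_⟩
  intro x y hx hx2 hy hy2
  rw [hgg x y hx hx2 hy hy2]
  split_ifs <;> first | rfl | omega

theorem pvDims_replicate (n' : Nat) (v : Int) :
    pvDims (List.replicate n' (List.replicate n' v)) n' := by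
  constructor
  · simp
  · intro row hrow
    rw [List.eq_of_mem_replicate hrow]
    simp

theorem pvStageA (K : Nat) : ∀ (J : Nat), J ≤ 2*K+1 →
    pvDims ((PySem.List.pyRange 0 (J:Int) 1).foldl
      (fun L j => (PySem.List.pyRange 0 ((2*K+1 : Nat):Int) 1).foldl (fun L i => pvSet2 L i j 0) L)
      (List.replicate (2*K+1) (List.replicate (2*K+1) (-1)))) (2*K+1) ∧
    (∀ x y : Int, 0 ≤ x → x < 2*K+1 → 0 ≤ y → y < 2*K+1 →
      pvGet2 ((PySem.List.pyRange 0 (J:Int) 1).foldl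
        (fun L j => (PySem.List.pyRange 0 ((2*K+1 : Nat):Int) 1).foldl (fun L i => pvSet2 L i j 0) L)
        (List.replicate (2*K+1) (List.replicate (2*K+1) (-1)))) x y
      = if y < (J:Int) then 0 else -1) := by
  intro J
  induction J with
  | zero =>
    intro _
    rw [show PySem.List.pyRange 0 ((0:Nat):Int) 1 = [] from PySem.List.pyRange_one_eq_nil (by omega)]
    simp only [List.foldl_nil]
    refine ⟨pvDims_replicate _ _, ?_⟩
    intro x y hx hx2 hy hy2
    rw [if_neg (by omega)]
    exact pvGet2_replicate _ _ _ _ hx hx2 hy hy2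
  | succ J ih =>
    intro hJ
    obtain ⟨ihd, ihg⟩ := ih (by omega)
    rw [show ((J+1 : Nat):Int) = (J:Int)+1 by push_cast; ring]
    rw [PySem.List.pyRange_one_succ_right (by omega), List.foldl_append]
    simp only [List.foldl_cons, List.foldl_nil]
    obtain ⟨cd, cg⟩ := pvColFill ihd (J:Int) 0 (by omega) (by omega)
    refine ⟨cd, ?_⟩
    intro x y hx hx2 hy hy2
    rw [cg x y hx hx2 hy hy2, ihg x y hx hx2 hy hy2]
    split_ifs <;> first | rfl | omega

theorem pvStageC (K : Nat) (g : List (List Int)) (hd : pvDims g (2*K+1)) :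
    ∀ (J : Nat), K+2 ≤ J → J ≤ 2*K+1 →
    pvDims ((PySem.List.pyRange ((K:Int)+2) (J:Int) 1).foldl
      (fun L j => (PySem.List.pyRange 0 ((2*K+1 : Nat):Int) 1).foldl (fun L i => pvSet2 L i j 2) L) g) (2*K+1) ∧
    (∀ x y : Int, 0 ≤ x → x < 2*K+1 → 0 ≤ y → y < 2*K+1 →
      pvGet2 ((PySem.List.pyRange ((K:Int)+2) (J:Int) 1).foldl
        (fun L j => (PySem.List.pyRange 0 ((2*K+1 : Nat):Int) 1).foldl (fun L i => pvSet2 L i j 2) L) g) x y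
      = if (K:Int)+2 ≤ y ∧ y < (J:Int) then 2 else pvGet2 g x y) := by
  intro J hJ1 hJ2
  induction J, hJ1 using Nat.le_induction with
  | base =>
    rw [show PySem.List.pyRange ((K:Int)+2) ((K+2 : Nat):Int) 1 = [] from
      PySem.List.pyRange_one_eq_nil (by push_cast; omega)]
    simp only [List.foldl_nil]
    refine ⟨hd, ?_⟩
    intro x y hx hx2 hy hy2
    rw [if_neg (by push_cast; omega)]
  | succ J hJ ih =>
    obtain ⟨ihd, ihg⟩ := ih (by omega)
    rw [show ((J+1 : Nat):Int) = (J:Int)+1 by push_cast; ring]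
    rw [PySem.List.pyRange_one_succ_right (by push_cast; omega), List.foldl_append]
    simp only [List.foldl_cons, List.foldl_nil]
    obtain ⟨cd, cg⟩ := pvColFill ihd (J:Int) 2 (by push_cast; omega) (by push_cast; omega)
    refine ⟨cd, ?_⟩
    intro x y hx hx2 hy hy2
    rw [cg x y hx hx2 hy hy2, ihg x y hx hx2 hy hy2]
    split_ifs <;> first | rfl | omega

theorem pvLuxFinal (K : Nat) (hK : 1 ≤ K) :
    pvDims (pvLuxTable (K:Int)) (2*K+1) ∧
    ∀ x y : Int, 0 ≤ x → x < 2*K+1 → 0 ≤ y → y < 2*K+1 →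
      pvGet2 (pvLuxTable (K:Int)) x y = pvRule (K:Int) x y := by
  simp only [pvLuxTable]
  rw [show (2*(K:Int)+1) = ((2*K+1 : Nat):Int) by push_cast; ring]
  rw [pvRowInit]
  rw [show ((2*K+1 : Nat):Int).toNat = 2*K+1 by omega]
  rw [show (K:Int)+1 = ((K+1 : Nat):Int) by push_cast; ring]
  obtain ⟨dA, gA⟩ := pvStageA K (K+1) (by omega)
  obtain ⟨dB, gB⟩ := pvColFill dA ((K+1 : Nat):Int) 1 (by push_cast; omega) (by push_cast; omega)
  obtain ⟨dC, gC⟩ := pvStageC K _ dB (2*K+1) (by omega) (le_refl _)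
  have d1 := pvDims_set2 dC (K:Int) ((K+1 : Nat):Int) 0 (by omega) (by omega)
  constructor
  · exact pvDims_set2 d1 (K:Int) (K:Int) 1 (by omega) (by omega)
  · intro x y hx hx2 hy hy2
    rw [pvGet2_set2 d1 1 (by omega) (by omega) (by omega) (by omega) hx hx2 hy hy2]
    rw [pvGet2_set2 dC 0 (by omega) (by omega) (by push_cast; omega) (by push_cast; omega) hx hx2 hy hy2]
    rw [gC x y hx hx2 hy hy2, gB x y hx hx2 hy hy2, gA x y hx hx2 hy hy2]
    unfold pvRule
    split_ifs <;> first | rfl | (push_cast at *; omega)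


theorem pvBound (K q r : Nat) (hq : q < 2*K+1) (hr : r < 2*K+1) :
    q*(2*K+1)+r+1 ≤ (2*K+1)*(2*K+1) := by
  have h1 : (q+1)*(2*K+1) = q*(2*K+1)+(2*K+1) := Nat.succ_mul _ _
  have h2 : (q+1)*(2*K+1) ≤ (2*K+1)*(2*K+1) := Nat.mul_le_mul_right _ (by omega)
  omega

set_option maxHeartbeats 3200000 in
theorem pvStepA_eq (K : Nat) (hK : 1 ≤ K) (q r : Nat) (hq : q < 2*K+1) (hr : r < 2*K+1) :
    pvStepA (K:Int) (pvLuxTable (K:Int)) (pvGridB K (q*(2*K+1)+r), pvPX K q r, pvPY K q r)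
        (4*((q*(2*K+1)+r : Nat) : Int)) =
      (pvGridB K (q*(2*K+1)+r+1),
       (if r+1 = 2*K+1 then pvPX K (q+1) 0 else pvPX K q (r+1)),
       (if r+1 = 2*K+1 then pvPY K (q+1) 0 else pvPY K q (r+1))) := by
  have hXr := pvPX_range K q r (by omega) hr
  have hYr := pvPY_range K q r (by omega) hr
  have hlux := (pvLuxFinal K hK).2 (pvPX K q r) (pvPY K q r)
    hXr.1 (by push_cast; omega) hYr.1 (by push_cast; omega)
  obtain ⟨hc1, hc2, hc3, hc4⟩ := pvCoords K q r hq hr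
  simp only [pvStepA]
  rw [hlux]
  -- the written grid is gridB's next grid
  have hsq : (if pvRule (K:Int) (pvPX K q r) (pvPY K q r) = 0 then
        pvSet2 (pvSet2 (pvSet2 (pvSet2 (pvGridB K (q*(2*K+1)+r)) (pvPX K q r*2) (pvPY K q r*2) (4*((q*(2*K+1)+r : Nat) : Int)+4)) (pvPX K q r*2+1) (pvPY K q r*2) (4*((q*(2*K+1)+r : Nat) : Int)+1)) (pvPX K q r*2) (pvPY K q r*2+1) (4*((q*(2*K+1)+r : Nat) : Int)+2)) (pvPX K q r*2+1) (pvPY K q r*2+1) (4*((q*(2*K+1)+r : Nat) : Int)+3)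
      else if pvRule (K:Int) (pvPX K q r) (pvPY K q r) = 1 then
        pvSet2 (pvSet2 (pvSet2 (pvSet2 (pvGridB K (q*(2*K+1)+r)) (pvPX K q r*2) (pvPY K q r*2) (4*((q*(2*K+1)+r : Nat) : Int)+1)) (pvPX K q r*2+1) (pvPY K q r*2) (4*((q*(2*K+1)+r : Nat) : Int)+4)) (pvPX K q r*2) (pvPY K q r*2+1) (4*((q*(2*K+1)+r : Nat) : Int)+2)) (pvPX K q r*2+1) (pvPY K q r*2+1) (4*((q*(2*K+1)+r : Nat) : Int)+3)
      else if pvRule (K:Int) (pvPX K q r) (pvPY K q r) = 2 then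
        pvSet2 (pvSet2 (pvSet2 (pvSet2 (pvGridB K (q*(2*K+1)+r)) (pvPX K q r*2) (pvPY K q r*2) (4*((q*(2*K+1)+r : Nat) : Int)+1)) (pvPX K q r*2+1) (pvPY K q r*2) (4*((q*(2*K+1)+r : Nat) : Int)+4)) (pvPX K q r*2) (pvPY K q r*2+1) (4*((q*(2*K+1)+r : Nat) : Int)+3)) (pvPX K q r*2+1) (pvPY K q r*2+1) (4*((q*(2*K+1)+r : Nat) : Int)+2)
      else pvGridB K (q*(2*K+1)+r))
      = pvGridB K (q*(2*K+1)+r+1) := by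
    rw [pvGridB_succ]
    simp only [pvStepB]
    rw [hc1, hc2, hc3, hc4]
    simp only [pvRule]
    split_ifs <;> first | rfl | omega
  rw [hsq]
  -- naive step coordinates
  have hnx : (if pvPX K q r + 1 = 2*(K:Int)+1 then 0 else pvPX K q r + 1)
      = (if r+1 = 2*K+1 then pvPX K q 0 else pvPX K q (r+1)) := by
    simp only [pvPX, pvWrap]
    split_ifs <;> omega
  have hny : (if pvPY K q r - 1 = -1 then 2*(K:Int) else pvPY K q r - 1)
      = (if r+1 = 2*K+1 then pvPY K q 0 else pvPY K q (r+1)) := by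
    simp only [pvPY, pvWrap]
    split_ifs <;> omega
  rw [hnx, hny]
  by_cases hr1 : r+1 = 2*K+1
  · simp only [if_pos hr1]
    have hfill := (pvGridB_filled K (q*(2*K+1)+r+1) (pvBound K q r hq hr)
        (pvPX_range K q 0 (by omega) (by omega)).1 (pvPX_range K q 0 (by omega) (by omega)).2
        (pvPY_range K q 0 (by omega) (by omega)).1 (pvPY_range K q 0 (by omega) (by omega)).2)
    rw [if_pos (hfill.mpr ⟨q*(2*K+1), by omega, pvX_eq K q 0 (by omega), pvY_eq K q 0 (by omega)⟩)]
    refine Prod.ext rfl (Prod.ext ?_ ?_)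
    · show (if pvPX K q 0 - 1 = -1 then 2*(K:Int) else pvPX K q 0 - 1) = pvPX K (q+1) 0
      simp only [pvPX, pvWrap]
      split_ifs <;> omega
    · show (if pvPY K q 0 + 2 = 2*(K:Int)+1 then 0 else if pvPY K q 0 + 2 = 2*(K:Int)+2 then 1 else pvPY K q 0 + 2) = pvPY K (q+1) 0
      simp only [pvPY, pvWrap]
      split_ifs <;> omega
  · simp only [if_neg hr1]
    have hfill := (pvGridB_filled K (q*(2*K+1)+r+1) (pvBound K q r hq hr)
        (pvPX_range K q (r+1) (by omega) (by omega)).1 (pvPX_range K q (r+1) (by omega) (by omega)).2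
        (pvPY_range K q (r+1) (by omega) (by omega)).1 (pvPY_range K q (r+1) (by omega) (by omega)).2)
    have hnone : ¬ ∃ t, t < q*(2*K+1)+r+1 ∧ pvX K t = pvPX K q (r+1) ∧ pvY K t = pvPY K q (r+1) := by
      rintro ⟨t, ht, hxx, hyy⟩
      obtain ⟨qt, rt, hrt, hdec⟩ : ∃ qt rt, rt < 2*K+1 ∧ t = qt*(2*K+1)+rt :=
        ⟨t/(2*K+1), t%(2*K+1), Nat.mod_lt _ (by omega),
          by rw [Nat.mul_comm]; exact (Nat.div_add_mod _ _).symm⟩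
      have hqt : qt < 2*K+1 := by
        by_contra hge
        rw [Nat.not_lt] at hge
        have h1 : (2*K+1)*(2*K+1) ≤ qt*(2*K+1) := Nat.mul_le_mul_right _ hge
        have := pvBound K q r hq hr
        omega
      subst hdec
      rw [pvX_eq K qt rt hrt] at hxx
      rw [pvY_eq K qt rt hrt] at hyy
      have hr2' : r+1 < 2*K+1 := lt_of_le_of_ne (Nat.succ_le_of_lt hr) hr1
      obtain ⟨hq', hr'⟩ := pvPair_inj K hK hqt hrt hq hr2' hxx hyy
      subst hq'
      subst hr'
      omega
    have hnot : ¬ (pvGet2 (pvGridB K (q*(2*K+1)+r+1)) (pvPX K q (r+1) * 2) (pvPY K q (r+1) * 2) ≠ 0) :=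
      fun hcol => hnone (hfill.mp hcol)
    rw [if_neg hnot]


theorem pvLoopA_eq (K : Nat) (hK : 1 ≤ K) : ∀ (T : Nat), T ≤ (2*K+1)*(2*K+1) →
    pvLoopA K T = (pvGridB K T, pvX K T, pvY K T) := by
  intro T
  induction T with
  | zero =>
    intro _
    have h1 : pvX K 0 = (K:Int) := by
      unfold pvX pvPX pvWrap
      simp only [Nat.zero_div, Nat.zero_mod, Nat.cast_zero]
      split_ifs <;> omega
    have h2 : pvY K 0 = 0 := by
      unfold pvY pvPY pvWrap
      simp only [Nat.zero_div, Nat.zero_mod, Nat.cast_zero]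
      split_ifs <;> omega
    rw [h1, h2]
    rfl
  | succ T ih =>
    intro hT
    obtain ⟨q, r, hr, hdec⟩ : ∃ q r, r < 2*K+1 ∧ T = q*(2*K+1)+r :=
      ⟨T/(2*K+1), T%(2*K+1), Nat.mod_lt _ (by omega),
        by rw [Nat.mul_comm]; exact (Nat.div_add_mod _ _).symm⟩
    have hq : q < 2*K+1 := by
      by_contra hge
      rw [Nat.not_lt] at hge
      have h1 : (2*K+1)*(2*K+1) ≤ q*(2*K+1) := Nat.mul_le_mul_right _ hge
      omega
    rw [pvLoopA_succ, ih (by omega)]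
    subst hdec
    rw [pvX_eq K q r hr, pvY_eq K q r hr]
    rw [pvStepA_eq K hK q r hq hr]
    by_cases hr1 : r+1 = 2*K+1
    · rw [if_pos hr1, if_pos hr1]
      have he : q*(2*K+1)+r+1 = (q+1)*(2*K+1)+0 := by
        have h2 : (q+1)*(2*K+1) = q*(2*K+1)+(2*K+1) := Nat.succ_mul _ _
        omega
      rw [he, pvX_eq K (q+1) 0 (by omega), pvY_eq K (q+1) 0 (by omega)]
    · rw [if_neg hr1, if_neg hr1]
      have he : q*(2*K+1)+r+1 = q*(2*K+1)+(r+1) := by omega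
      rw [he, pvX_eq K q (r+1) (by omega), pvY_eq K q (r+1) (by omega)]

theorem pvMain (K : Nat) (hK : 1 ≤ K) :
    lux_magic_square ((4*K+2 : Nat) : Int) = lux_magic_square_alt ((4*K+2 : Nat) : Int) := by
  have hg : PySem.Int.mod (((4*K+2 : Nat) : Int) - 2) 4 = 0 := by
    rw [PySem.Int.mod_eq_emod_of_pos (by norm_num)]
    push_cast
    omega
  have hk : PySem.Int.floordiv (((4*K+2 : Nat) : Int) - 2) 4 = (K:Int) := by
    rw [show (((4*K+2 : Nat) : Int)) - 2 = ((4*K : Nat) : Int) by push_cast; ring]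
    rw [show (4:Int) = ((4:Nat):Int) by norm_num]
    rw [PySem.Int.floordiv_natCast]
    exact_mod_cast congrArg (Nat.cast : Nat → Int) (by omega)
  have htn : (((4*K+2 : Nat) : Int)).toNat = 4*K+2 := by omega
  simp only [lux_magic_square, lux_magic_square_alt]
  rw [if_neg (by simp [hg]), if_neg (by simp [hg]), if_neg (by push_cast; omega)]
  rw [hk, htn]
  -- A's initial square
  have hinit := pvInitA ((4*K+2 : Nat) : Int) (by positivity)
  rw [htn] at hinit
  rw [hinit]
  -- A's loop range
  rw [PySem.List.pyRange_of_pos 0 (((4*K+2 : Nat) : Int)^2) (s := 4) (by norm_num)]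
  rw [if_pos (by positivity)]
  have hcnt : ((((4*K+2 : Nat) : Int))^2 - 0 + 4 - 1) = ((16*(K*K)+16*K+7 : Nat) : Int) := by
    push_cast; ring
  rw [hcnt, show (4:Int) = ((4:Nat):Int) by norm_num]
  rw [← Int.natCast_ediv, Int.toNat_natCast]
  have hT' : (16*(K*K)+16*K+7) / 4 = (2*K+1)*(2*K+1) := by
    have h : (2*K+1)*(2*K+1) = 4*(K*K)+4*K+1 := by ring
    omega
  rw [hT']
  rw [List.foldl_map]
  simp only [zero_add]
  -- B's range
  rw [PySem.List.pyRange_one]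
  rw [show (2*(K:Int)+1)*(2*(K:Int)+1) - 0 = (((2*K+1)*(2*K+1) : Nat) : Int) by push_cast; ring]
  rw [Int.toNat_natCast, List.foldl_map]
  simp only [zero_add]
  show (pvLoopA K ((2*K+1)*(2*K+1))).1 = pvGridB K ((2*K+1)*(2*K+1))
  rw [pvLoopA_eq K hK _ (le_refl _)]

-- ===== VERDICT (by name: the statement is the Claim_ definition above) =====
theorem lux_magic_square_spec : Claim_equal_lux_magic_square := by
  intro n _ hpre
  unfold Spec_lux_magic_square
  by_cases hmod : n % 4 = 2
  · have h6 : 6 ≤ n := hpre hmod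
    obtain ⟨K, hK, hn⟩ : ∃ K : Nat, 1 ≤ K ∧ n = ((4*K+2 : Nat) : Int) := by
      refine ⟨(n.toNat - 2)/4, by omega, ?_⟩
      omega
    subst hn
    exact pvMain K hK
  · -- guard branch: both return []
    have hA : lux_magic_square n = [] := by
      unfold lux_magic_square
      rw [if_pos]
      rw [PySem.Int.mod_eq_emod_of_pos (by norm_num)]
      omega
    have hB : lux_magic_square_alt n = [] := by
      unfold lux_magic_square_alt
      rw [if_pos]
      rw [PySem.Int.mod_eq_emod_of_pos (by norm_num)]
      omega
    rw [hA, hB]
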